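-- pv_equiv track=rewrite | github.com/Amborsia/jungle_algorithm | week04/cdhcsh/1516(게임 개발).py | solve
-- ===== SOURCE A (Python) =====
-- from collections import deque
--
-- def solve(n: int, data: list[list[int]]) -> list[int]:
--     nodes = [set() for _ in range(n + 1)]
--     build_time = [0] * (n + 1)
--     require_time = [0] * (n + 1)
--     in_degree = deque()
--     for i, d in enumerate(data):
--         i += 1
--         build_time[i] = d[0]
--         if d[1] < 0:
--             in_degree.append(i)
--         else:
--             for j in range(1, len(d) - 1):
--                 nodes[i].add(d[j])
--     while in_degree:
--         require = in_degree.popleft()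
--         for current in range(1, n + 1):
--             if require in nodes[current]:
--                 require_time[current] = max(require_time[current], build_time[require] + require_time[require])
--                 nodes[current].remove(require)
--                 if not nodes[current]:
--                     in_degree.append(current)
--     return [(build_time[i] + require_time[i]) for i in range(1, n + 1)]
-- ===== SOURCE B (Python) =====
-- from collections import deque
--
-- def solve(n: int, data: list[list[int]]) -> list[int]:
--     build = [0] * (n + 1)
--     req = [0] * (n + 1)
--     remaining = [0] * (n + 1)
--     rev = [[] for _ in range(n + 1)]   # rev[r] = nodes that list r among their prerequisites, ascending
--     queue = deque()
--     for i, d in enumerate(data, 1):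
--         build[i] = d[0]
--         if d[1] < 0:
--             queue.append(i)
--         else:
--             ds = set(d[1:-1])
--             remaining[i] = len(ds)
--             for r in ds:
--                 if 1 <= r <= n:
--                     rev[r].append(i)
--     while queue:
--         r = queue.popleft()
--         fr = build[r] + req[r]
--         for i in rev[r]:
--             if req[i] < fr:
--                 req[i] = fr
--             remaining[i] -= 1
--             if remaining[i] == 0:
--                 queue.append(i)
--     return [build[i] + req[i] for i in range(1, n + 1)]
-- ===== Notes on version B (the rewrite author's own statement) =====
-- stated objective: faster
-- what changed: A pops a ready game and rescans all n nodes' dependency sets per pop; B precomputes a reverse adjacency list and per-node indegree counters once, so each pop only touches the popped game's actual dependents (Kahn's algorithm, O(V+E) instead of O(V^2)).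
import Mathlib
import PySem

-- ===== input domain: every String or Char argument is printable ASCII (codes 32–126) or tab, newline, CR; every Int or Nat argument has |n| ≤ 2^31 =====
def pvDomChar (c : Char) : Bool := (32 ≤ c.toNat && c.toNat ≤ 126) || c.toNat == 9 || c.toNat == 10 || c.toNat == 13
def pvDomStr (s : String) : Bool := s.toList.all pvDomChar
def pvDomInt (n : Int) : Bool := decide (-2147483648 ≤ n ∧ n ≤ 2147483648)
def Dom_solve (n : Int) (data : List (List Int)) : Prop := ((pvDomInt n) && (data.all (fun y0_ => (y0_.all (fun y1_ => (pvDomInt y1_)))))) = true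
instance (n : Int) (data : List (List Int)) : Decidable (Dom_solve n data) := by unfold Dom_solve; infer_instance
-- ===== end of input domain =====

-- B replaces A's O(n) scan of all nodes per processed game by a precomputed reverse
-- adjacency list with indegree counters (Kahn); same return value on Pre_solve.

-- Python's fixed-size integer-indexed lists are ported as total functions Int → _ ;
-- under Pre_solve every index either program reads or writes lies in [0, n], where this is exact.
def pvUpd {α : Type} (f : Int → α) (i : Int) (v : α) : Int → α :=
  fun x => if x = i then v else f x

-- ===== PORT A =====

-- body of A's first loop (over enumerate(data)); builds (nodes, build_time, in_degree)
def solveInitStep (st : (Int → PySem.Set Int) × (Int → Int) × List Int) (p : Int × List Int) :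
    (Int → PySem.Set Int) × (Int → Int) × List Int :=
  let i := p.1 + 1
  let d := p.2
  let bt := pvUpd st.2.1 i (PySem.List.pyGetD d 0 0)
  if PySem.List.pyGetD d 1 0 < 0 then
    (st.1, bt, st.2.2 ++ [i])
  else
    ((PySem.List.pyRange 1 (PySem.List.len d - 1) 1).foldl
       (fun nd j => pvUpd nd i (PySem.Set.add (nd i) (PySem.List.pyGetD d j 0)))
       st.1,
     bt, st.2.2)

def solveInit (data : List (List Int)) :
    (Int → PySem.Set Int) × (Int → Int) × List Int :=
  (PySem.List.enumerate data).foldl solveInitStep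
    ((fun _ => PySem.Set.empty), (fun _ => 0), [])

-- body of A's inner 'for current in range(1, n+1)' for the popped node r
def solveStep (build : Int → Int) (r : Int)
    (st : (Int → PySem.Set Int) × (Int → Int) × List Int) (c : Int) :
    (Int → PySem.Set Int) × (Int → Int) × List Int :=
  if PySem.Set.contains (st.1 c) r then
    let req' := pvUpd st.2.1 c (max (st.2.1 c) (build r + st.2.1 r))
    let s' := PySem.Set.discard (st.1 c) r   -- set.remove; exact here: the guard ensures membership
    let nodes' := pvUpd st.1 c s'
    if s' = [] then (nodes', req', st.2.2 ++ [c]) else (nodes', req', st.2.2)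
  else st

-- A's while-loop; the fuel passed below bounds the number of pops (each node is enqueued once)
def solveLoop (n : Int) (build : Int → Int) :
    Nat → (Int → PySem.Set Int) → (Int → Int) → List Int → (Int → Int)
  | 0, _, req, _ => req
  | fuel + 1, nodes, req, queue =>
    match queue with
    | [] => req
    | r :: rest =>
      let st := (PySem.List.pyRange 1 (n + 1) 1).foldl (solveStep build r) (nodes, req, rest)
      solveLoop n build fuel st.1 st.2.1 st.2.2

def solve (n : Int) (data : List (List Int)) : List Int :=
  let init := solveInit data
  let req := solveLoop n init.2.1 (data.length + (n + 1).toNat) init.1 (fun _ => 0) init.2.2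
  (PySem.List.pyRange 1 (n + 1) 1).map (fun i => init.2.1 i + req i)

-- ===== PORT B =====

-- body of B's first loop (over enumerate(data, 1)); builds (build, remaining, rev, queue).
-- Iterating the Python set ds only appends each row index i to pairwise different rev lists,
-- so the result does not depend on the set's iteration order; we use insertion order.
def solveAltInitStep (n : Int)
    (st : (Int → Int) × (Int → Int) × (Int → List Int) × List Int) (p : Int × List Int) :
    (Int → Int) × (Int → Int) × (Int → List Int) × List Int :=
  let i := p.1
  let d := p.2
  let build := pvUpd st.1 i (PySem.List.pyGetD d 0 0)
  if PySem.List.pyGetD d 1 0 < 0 then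
    (build, st.2.1, st.2.2.1, st.2.2.2 ++ [i])
  else
    let ds := PySem.Set.ofList (PySem.List.slice d (some 1) (some (-1)))
    let rev := ds.foldl
      (fun rv r => if 1 ≤ r ∧ r ≤ n then pvUpd rv r (rv r ++ [i]) else rv) st.2.2.1
    (build, pvUpd st.2.1 i (PySem.Set.len ds), rev, st.2.2.2)

def solveAltInit (n : Int) (data : List (List Int)) :
    (Int → Int) × (Int → Int) × (Int → List Int) × List Int :=
  (PySem.List.enumerate data 1).foldl (solveAltInitStep n)
    ((fun _ => 0), (fun _ => 0), (fun _ => []), [])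

-- body of B's inner 'for i in rev[r]' with fr = build[r] + req[r] of the popped node r
def solveAltStep (fr : Int)
    (st : (Int → Int) × (Int → Int) × List Int) (i : Int) :
    (Int → Int) × (Int → Int) × List Int :=
  let req' := if st.2.1 i < fr then pvUpd st.2.1 i fr else st.2.1
  let rem' := pvUpd st.1 i (st.1 i - 1)
  if rem' i = 0 then (rem', req', st.2.2 ++ [i]) else (rem', req', st.2.2)

-- B's while-loop over the queue
def solveAltLoop (build : Int → Int) (rev : Int → List Int) :
    Nat → (Int → Int) → (Int → Int) → List Int → (Int → Int)
  | 0, _, req, _ => req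
  | fuel + 1, rem, req, queue =>
    match queue with
    | [] => req
    | r :: rest =>
      let fr := build r + req r
      let st := (rev r).foldl (solveAltStep fr) (rem, req, rest)
      solveAltLoop build rev fuel st.1 st.2.1 st.2.2

def solve_alt (n : Int) (data : List (List Int)) : List Int :=
  let init := solveAltInit n data
  let req := solveAltLoop init.1 init.2.2.1 (data.length + (n + 1).toNat) init.2.1 (fun _ => 0) init.2.2.2
  (PySem.List.pyRange 1 (n + 1) 1).map (fun i => init.1 i + req i)

-- ===== PRECONDITION & SPEC =====
-- Pre_solve excludes exactly the inputs where A raises: a row shorter than 2 hits d[0]/d[1]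
-- (IndexError) and more rows than n hits build_time[i] (IndexError); A returns everywhere else.
def Pre_solve (n : Int) (data : List (List Int)) : Prop :=
  ((data.length : Int) ≤ n ∨ data = []) ∧ ∀ d ∈ data, 2 ≤ d.length
instance (n : Int) (data : List (List Int)) : Decidable (Pre_solve n data) := by
  unfold Pre_solve; infer_instance

def pvWitness_solve : Int × List (List Int) := (3, [[5, -1], [3, 1, -1], [2, 1, 2, -1]])

def Spec_solve (n : Int) (data : List (List Int)) (out : List Int) : Prop := out = solve_alt n data
instance (n : Int) (data : List (List Int)) (out : List Int) : Decidable (Spec_solve n data out) := by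
  unfold Spec_solve; infer_instance

-- ===== CLAIM (what is proved, stated in full; the proofs are below) =====
def Claim_equal_solve : Prop := ∀ (n : Int) (data : List (List Int)), Dom_solve n data → Pre_solve n data → Spec_solve n data (solve n data)

-- ===== LEMMAS AND PROOFS =====

theorem pvUpd_same {α : Type} (f : Int → α) (i : Int) (v : α) : pvUpd f i v i = v := by
  simp [pvUpd]
theorem pvUpd_ne {α : Type} (f : Int → α) (i x : Int) (v : α) (h : x ≠ i) : pvUpd f i v x = f x := by
  simp [pvUpd, h]
theorem pvUpd_pvUpd {α : Type} (f : Int → α) (i : Int) (a b : α) :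
    pvUpd (pvUpd f i a) i b = pvUpd f i b := by
  funext x; by_cases h : x = i <;> simp [pvUpd, h]
theorem pvUpd_self {α : Type} (f : Int → α) (i : Int) : pvUpd f i (f i) = f := by
  funext x; by_cases h : x = i <;> simp [pvUpd, h]

def pvRow (data : List (List Int)) (i : Int) : List Int :=
  if 1 ≤ i ∧ i ≤ (data.length : Int) then data.getD (i - 1).toNat [] else []

def pvSrc (data : List (List Int)) (i : Int) : Bool :=
  decide (1 ≤ i ∧ i ≤ (data.length : Int)) && decide (PySem.List.pyGetD (pvRow data i) 1 0 < 0)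

def pvDeps (data : List (List Int)) (i : Int) : List Int :=
  if 1 ≤ i ∧ i ≤ (data.length : Int) ∧ ¬ PySem.List.pyGetD (pvRow data i) 1 0 < 0 then
    PySem.Set.ofList ((pvRow data i).dropLast.drop 1)
  else []

def pvBt (data : List (List Int)) (i : Int) : Int :=
  if 1 ≤ i ∧ i ≤ (data.length : Int) then PySem.List.pyGetD (pvRow data i) 0 0 else 0

def pvQ0 (data : List (List Int)) : List Int :=
  (PySem.List.pyRange 1 ((data.length : Int) + 1) 1).filter (pvSrc data)

def pvRev (n : Int) (data : List (List Int)) (r : Int) : List Int :=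
  if 1 ≤ r ∧ r ≤ n then
    (PySem.List.pyRange 1 ((data.length : Int) + 1) 1).filter (fun c => decide (r ∈ pvDeps data c))
  else []

def pvNodes (data : List (List Int)) (P : List Int) (c : Int) : List Int :=
  (pvDeps data c).filter (fun y => !P.contains y)

theorem pvRow_append (data : List (List Int)) (d : List Int) (i : Int) :
    pvRow (data ++ [d]) i = if i = (data.length : Int) + 1 then d else pvRow data i := by
  unfold pvRow
  by_cases h : i = (data.length : Int) + 1
  · subst h
    have h1 : (1 ≤ (data.length : Int) + 1 ∧ (data.length : Int) + 1 ≤ ((data ++ [d]).length : Int)) :=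
      ⟨by omega, by simp⟩
    rw [if_pos h1, if_pos rfl]
    have ht : (((data.length : Int) + 1 - 1)).toNat = data.length := by omega
    rw [ht, List.getD_eq_getElem?_getD, List.getElem?_append_right (le_refl _)]
    simp
  · rw [if_neg h]
    by_cases h2 : 1 ≤ i ∧ i ≤ (data.length : Int)
    · have h3 : (1 ≤ i ∧ i ≤ ((data ++ [d]).length : Int)) :=
        ⟨h2.1, by simp; omega⟩
      rw [if_pos h3, if_pos h2]
      have hlt' : (i - 1).toNat < data.length := by omega
      rw [List.getD_eq_getElem?_getD, List.getD_eq_getElem?_getD, List.getElem?_append_left hlt']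
    · have h3 : ¬ (1 ≤ i ∧ i ≤ ((data ++ [d]).length : Int)) := by
        simp at h2 ⊢; omega
      rw [if_neg h3, if_neg h2]

theorem pvSrc_append (data : List (List Int)) (d : List Int) (i : Int) :
    pvSrc (data ++ [d]) i
      = if i = (data.length : Int) + 1 then decide (PySem.List.pyGetD d 1 0 < 0)
        else pvSrc data i := by
  unfold pvSrc
  rw [pvRow_append]
  by_cases h : i = (data.length : Int) + 1
  · subst h
    have h1 : (1 ≤ (data.length : Int) + 1 ∧ (data.length : Int) + 1 ≤ ((data ++ [d]).length : Int)) :=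
      ⟨by omega, by simp⟩
    simp [h1]
  · rw [if_neg h, if_neg h]
    by_cases h2 : 1 ≤ i ∧ i ≤ (data.length : Int)
    · have h4 : i ≤ (data.length : Int) + 1 := by omega
      simp [h2, h4]
    · simp [h2]
      intro h5 h6
      exfalso; omega

theorem pvBt_append (data : List (List Int)) (d : List Int) (i : Int) :
    pvBt (data ++ [d]) i
      = if i = (data.length : Int) + 1 then PySem.List.pyGetD d 0 0
        else pvBt data i := by
  unfold pvBt
  rw [pvRow_append]
  by_cases h : i = (data.length : Int) + 1
  · subst h
    have h1 : (1 ≤ (data.length : Int) + 1 ∧ (data.length : Int) + 1 ≤ ((data ++ [d]).length : Int)) :=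
      ⟨by omega, by simp⟩
    simp [h1]
  · rw [if_neg h, if_neg h]
    by_cases h2 : 1 ≤ i ∧ i ≤ (data.length : Int)
    · have h4 : i ≤ (data.length : Int) + 1 := by omega
      simp [h2, h4]
    · simp [h2]
      intro h5 h6
      exfalso; omega

theorem pvDeps_append (data : List (List Int)) (d : List Int) (i : Int) :
    pvDeps (data ++ [d]) i
      = if i = (data.length : Int) + 1 then
          (if PySem.List.pyGetD d 1 0 < 0 then []
           else PySem.Set.ofList (d.dropLast.drop 1))
        else pvDeps data i := by
  unfold pvDeps
  rw [pvRow_append]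
  by_cases h : i = (data.length : Int) + 1
  · subst h
    rw [if_pos rfl, if_pos rfl]
    by_cases hs : PySem.List.pyGetD d 1 0 < 0
    · rw [if_neg (by simp; omega), if_pos hs]
    · rw [if_pos ⟨by omega, by simp, hs⟩, if_neg hs]
  · rw [if_neg h, if_neg h]
    by_cases h2 : 1 ≤ i ∧ i ≤ (data.length : Int)
    · by_cases hs : PySem.List.pyGetD (pvRow data i) 1 0 < 0
      · rw [if_neg (by tauto), if_neg (by tauto)]
      · rw [if_pos ⟨h2.1, by simp; omega, hs⟩, if_pos ⟨h2.1, h2.2, hs⟩]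
    · have h3 : ¬ (1 ≤ i ∧ i ≤ ((data ++ [d]).length : Int)) := by
        simp only [List.length_append, List.length_cons, List.length_nil] at *; omega
      rw [if_neg (by tauto), if_neg (by tauto)]

theorem pvDeps_nil_of_out (data : List (List Int)) (i : Int)
    (h : ¬ (1 ≤ i ∧ i ≤ (data.length : Int))) : pvDeps data i = [] := by
  unfold pvDeps; rw [if_neg (by tauto)]

theorem pvDeps_nodup (data : List (List Int)) (i : Int) : (pvDeps data i).Nodup := by
  unfold pvDeps
  split
  · exact PySem.Set.nodup_ofList _
  · exact List.nodup_nil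

theorem foldl_pvUpd_collapse {α β : Type} (L : List β) (i : Int) (g : α → β → α) :
    ∀ f0 : Int → α,
      L.foldl (fun nd j => pvUpd nd i (g (nd i) j)) f0 = pvUpd f0 i (L.foldl g (f0 i)) := by
  induction L with
  | nil => intro f0; exact (pvUpd_self f0 i).symm
  | cons j L ih =>
    intro f0
    simp only [List.foldl_cons]
    rw [ih, pvUpd_pvUpd, pvUpd_same]

theorem foldl_rev_collapse (n i : Int) (ds : List Int) (hnd : ds.Nodup) :
    ∀ (rv : Int → List Int) (x : Int),
      (ds.foldl (fun rv r => if 1 ≤ r ∧ r ≤ n then pvUpd rv r (rv r ++ [i]) else rv) rv) x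
        = if 1 ≤ x ∧ x ≤ n ∧ x ∈ ds then rv x ++ [i] else rv x := by
  induction ds with
  | nil => intro rv x; simp
  | cons r ds ih =>
    intro rv x
    simp only [List.foldl_cons]
    have hnd' := (List.nodup_cons.mp hnd).2
    have hrds : r ∉ ds := (List.nodup_cons.mp hnd).1
    rw [ih hnd']
    by_cases hbr : 1 ≤ r ∧ r ≤ n
    · rw [if_pos hbr]
      by_cases hxr : x = r
      · subst hxr
        rw [if_neg (fun hc => hrds hc.2.2), if_pos ⟨hbr.1, hbr.2, List.mem_cons_self⟩, pvUpd_same]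
      · rw [pvUpd_ne _ _ _ _ hxr]
        by_cases hc : 1 ≤ x ∧ x ≤ n ∧ x ∈ ds
        · rw [if_pos hc, if_pos ⟨hc.1, hc.2.1, List.mem_cons_of_mem r hc.2.2⟩]
        · rw [if_neg hc, if_neg (by
            intro hc2
            exact hc ⟨hc2.1, hc2.2.1, by
              rcases List.mem_cons.mp hc2.2.2 with h | h
              · exact absurd h hxr
              · exact h⟩)]
    · rw [if_neg hbr]
      by_cases hc : 1 ≤ x ∧ x ≤ n ∧ x ∈ ds
      · rw [if_pos hc, if_pos ⟨hc.1, hc.2.1, List.mem_cons_of_mem r hc.2.2⟩]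
      · rw [if_neg hc, if_neg (by
          intro hc2
          rcases List.mem_cons.mp hc2.2.2 with h | h
          · subst h; exact hbr ⟨hc2.1, hc2.2.1⟩
          · exact hc ⟨hc2.1, hc2.2.1, h⟩)]

theorem slice_one_neg_one (d : List Int) :
    PySem.List.slice d (some 1) (some (-1)) = d.dropLast.drop 1 := by
  cases d with
  | nil => rfl
  | cons x t =>
    simp [PySem.List.slice, PySem.List.clampIdx, List.dropLast_eq_take, List.drop_take]
    split <;> omega

theorem A_deps_value (d : List Int) :
    (PySem.List.pyRange 1 (PySem.List.len d - 1) 1).foldl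
      (fun s j => PySem.Set.add s (PySem.List.pyGetD d j 0)) PySem.Set.empty
      = PySem.Set.ofList (d.dropLast.drop 1) := by
  cases d with
  | nil => rfl
  | cons x t =>
    have hb : PySem.List.len (x :: t) - 1 = PySem.List.len ((x :: t).dropLast) := by
      simp [PySem.List.len_eq]
    rw [hb]
    rw [PySem.List.foldl_congr_mem _ _
        (fun s j => PySem.Set.add s (PySem.List.pyGetD ((x :: t).dropLast) j 0)) _ ?_]
    · rw [PySem.List.len_eq, PySem.List.foldl_pyRange_pyGetD' _ 0 _ _ (by omega)]
      rfl
    · intro acc j hj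
      have hj' := PySem.List.mem_pyRange_one.mp hj
      rw [PySem.List.len_eq] at hj'
      have h1 : (0:Int) ≤ j := by omega
      have h2 : j < ((x :: t).dropLast.length : Int) := by omega
      have h3 : j < ((x :: t).length : Int) := by
        simp at h2 ⊢; omega
      congr 1
      rw [PySem.List.pyGetD_eq_getElem _ _ h1 h3, PySem.List.pyGetD_eq_getElem _ _ h1 h2]
      exact (List.getElem_dropLast _).symm

theorem pvQ0_append (data : List (List Int)) (d : List Int) :
    pvQ0 (data ++ [d])
      = pvQ0 data ++ (if PySem.List.pyGetD d 1 0 < 0 then [(data.length : Int) + 1] else []) := by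
  unfold pvQ0
  have hl : ((data ++ [d]).length : Int) + 1 = ((data.length : Int) + 1) + 1 := by simp
  rw [hl, PySem.List.pyRange_one_succ_right (by omega), List.filter_append]
  congr 1
  · apply List.filter_congr
    intro c hc
    have hm := PySem.List.mem_pyRange_one.mp hc
    rw [pvSrc_append, if_neg (by omega)]
  · rw [List.filter_singleton, pvSrc_append, if_pos rfl]
    by_cases hs : PySem.List.pyGetD d 1 0 < 0 <;> simp [hs]

theorem pvRev_append (n : Int) (data : List (List Int)) (d : List Int) (r : Int) :
    pvRev n (data ++ [d]) r
      = pvRev n data r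
        ++ (if 1 ≤ r ∧ r ≤ n ∧ r ∈ pvDeps (data ++ [d]) ((data.length : Int) + 1)
            then [(data.length : Int) + 1] else []) := by
  unfold pvRev
  by_cases hb : 1 ≤ r ∧ r ≤ n
  · rw [if_pos hb, if_pos hb]
    have hl : ((data ++ [d]).length : Int) + 1 = ((data.length : Int) + 1) + 1 := by simp
    rw [hl, PySem.List.pyRange_one_succ_right (by omega), List.filter_append]
    congr 1
    · apply List.filter_congr
      intro c hc
      have hm := PySem.List.mem_pyRange_one.mp hc
      rw [pvDeps_append, if_neg (by omega)]
    · rw [List.filter_singleton]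
      by_cases hmem : r ∈ pvDeps (data ++ [d]) ((data.length : Int) + 1)
      · simp [hmem, hb.1, hb.2]
      · simp [hmem]
  · rw [if_neg hb, if_neg hb, if_neg (by tauto), List.append_nil]

theorem solveInit_spec (data : List (List Int)) :
    solveInit data = ((fun i => pvDeps data i), (fun i => pvBt data i), pvQ0 data) := by
  induction data using List.reverseRecOn with
  | nil =>
    unfold solveInit
    rw [show PySem.List.enumerate ([] : List (List Int)) = [] from rfl]
    simp only [List.foldl_nil]
    refine Prod.ext ?_ (Prod.ext ?_ ?_)
    · funext i
      show (PySem.Set.empty : PySem.Set Int) = pvDeps [] i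
      rw [pvDeps_nil_of_out _ _ (by rintro ⟨a, b⟩; simp at b; omega)]
      rfl
    · funext i
      show (0 : Int) = pvBt [] i
      unfold pvBt
      rw [if_neg (by rintro ⟨a, b⟩; simp at b; omega)]
    · rfl
  | append_singleton data d ih =>
    unfold solveInit at ih ⊢
    rw [PySem.List.enumerate_append, List.foldl_append, ih]
    rw [show PySem.List.enumerate [d] (0 + (data.length : Int))
          = [((data.length : Int), d)] from by
        simp [PySem.List.enumerate_cons, PySem.List.enumerate_nil]]
    simp only [List.foldl_cons, List.foldl_nil]
    unfold solveInitStep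
    have hout : pvDeps data ((data.length : Int) + 1) = [] :=
      pvDeps_nil_of_out _ _ (by rintro ⟨a, b⟩; omega)
    have e2 : pvUpd (fun i => pvBt data i) ((data.length : Int) + 1) (PySem.List.pyGetD d 0 0)
        = fun i => pvBt (data ++ [d]) i := by
      funext x
      rw [pvBt_append]
      simp only [pvUpd]
    by_cases hs : PySem.List.pyGetD d 1 0 < 0
    · rw [if_pos hs]
      have e1 : (fun i => pvDeps data i) = fun i => pvDeps (data ++ [d]) i := by
        funext x
        rw [pvDeps_append]
        by_cases hx : x = (data.length : Int) + 1
        · rw [if_pos hx, if_pos hs, hx, hout]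
        · rw [if_neg hx]
      have e3 : pvQ0 data ++ [(data.length : Int) + 1] = pvQ0 (data ++ [d]) := by
        rw [pvQ0_append, if_pos hs]
      exact Prod.ext e1 (Prod.ext e2 e3)
    · rw [if_neg hs]
      have e1 : (PySem.List.pyRange 1 (PySem.List.len d - 1) 1).foldl
          (fun nd j => pvUpd nd ((data.length : Int) + 1)
            (PySem.Set.add (nd ((data.length : Int) + 1)) (PySem.List.pyGetD d j 0)))
          (fun i => pvDeps data i)
          = fun i => pvDeps (data ++ [d]) i := by
        rw [foldl_pvUpd_collapse (PySem.List.pyRange 1 (PySem.List.len d - 1) 1)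
              ((data.length : Int) + 1) (fun s j => PySem.Set.add s (PySem.List.pyGetD d j 0))]
        funext x
        rw [pvDeps_append]
        by_cases hx : x = (data.length : Int) + 1
        · rw [if_pos hx, if_neg hs, hx, pvUpd_same, hout]
          rw [show (([] : List Int)) = (PySem.Set.empty : PySem.Set Int) from rfl, A_deps_value]
        · rw [if_neg hx, pvUpd_ne _ _ _ _ hx]
      have e3 : pvQ0 data = pvQ0 (data ++ [d]) := by
        rw [pvQ0_append, if_neg hs, List.append_nil]
      exact Prod.ext e1 (Prod.ext e2 e3)

theorem solveAltInit_spec (n : Int) (data : List (List Int)) :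
    solveAltInit n data
      = ((fun i => pvBt data i), (fun i => ((pvDeps data i).length : Int)),
         (fun r => pvRev n data r), pvQ0 data) := by
  induction data using List.reverseRecOn with
  | nil =>
    unfold solveAltInit
    rw [show PySem.List.enumerate ([] : List (List Int)) 1 = [] from rfl]
    simp only [List.foldl_nil]
    refine Prod.ext ?_ (Prod.ext ?_ (Prod.ext ?_ ?_))
    · funext i
      show (0 : Int) = pvBt [] i
      unfold pvBt
      rw [if_neg (by rintro ⟨a, b⟩; simp at b; omega)]
    · funext i
      show (0 : Int) = ((pvDeps [] i).length : Int)
      rw [pvDeps_nil_of_out _ _ (by rintro ⟨a, b⟩; simp at b; omega)]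
      rfl
    · funext r
      show ([] : List Int) = pvRev n [] r
      unfold pvRev
      split
      · rw [show ((List.length ([] : List (List Int)) : Int) + 1) = 1 from by simp,
            PySem.List.pyRange_one_eq_nil (by omega)]
        rfl
      · rfl
    · rfl
  | append_singleton data d ih =>
    unfold solveAltInit at ih ⊢
    rw [PySem.List.enumerate_append, List.foldl_append, ih]
    rw [show PySem.List.enumerate [d] (1 + (data.length : Int))
          = [((data.length : Int) + 1, d)] from by
        simp [PySem.List.enumerate_cons, PySem.List.enumerate_nil, Int.add_comm]]
    simp only [List.foldl_cons, List.foldl_nil]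
    unfold solveAltInitStep
    simp only [slice_one_neg_one]
    have hout : pvDeps data ((data.length : Int) + 1) = [] :=
      pvDeps_nil_of_out _ _ (by rintro ⟨a, b⟩; omega)
    have hnew : pvDeps (data ++ [d]) ((data.length : Int) + 1)
        = (if PySem.List.pyGetD d 1 0 < 0 then []
           else PySem.Set.ofList (d.dropLast.drop 1)) := by
      rw [pvDeps_append, if_pos rfl]
    have e1 : pvUpd (fun i => pvBt data i) ((data.length : Int) + 1) (PySem.List.pyGetD d 0 0)
        = fun i => pvBt (data ++ [d]) i := by
      funext x
      rw [pvBt_append]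
      simp only [pvUpd]
    by_cases hs : PySem.List.pyGetD d 1 0 < 0
    · rw [if_pos hs]
      rw [if_pos hs] at hnew
      have e2 : (fun i => ((pvDeps data i).length : Int))
          = fun i => ((pvDeps (data ++ [d]) i).length : Int) := by
        funext x
        rw [pvDeps_append]
        by_cases hx : x = (data.length : Int) + 1
        · rw [if_pos hx, if_pos hs, hx, hout]
        · rw [if_neg hx]
      have e3 : (fun r => pvRev n data r) = fun r => pvRev n (data ++ [d]) r := by
        funext x
        rw [pvRev_append, hnew]
        rw [if_neg (by rintro ⟨a, b, c⟩; simp at c), List.append_nil]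
      have e4 : pvQ0 data ++ [(data.length : Int) + 1] = pvQ0 (data ++ [d]) := by
        rw [pvQ0_append, if_pos hs]
      exact Prod.ext e1 (Prod.ext e2 (Prod.ext e3 e4))
    · rw [if_neg hs]
      rw [if_neg hs] at hnew
      have e2 : pvUpd (fun i => ((pvDeps data i).length : Int)) ((data.length : Int) + 1)
          (PySem.Set.len (PySem.Set.ofList (d.dropLast.drop 1)))
          = fun i => ((pvDeps (data ++ [d]) i).length : Int) := by
        funext x
        rw [pvDeps_append]
        by_cases hx : x = (data.length : Int) + 1
        · rw [if_pos hx, if_neg hs, hx, pvUpd_same]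
          rfl
        · rw [if_neg hx, pvUpd_ne _ _ _ _ hx]
      have e3 : (PySem.Set.ofList (d.dropLast.drop 1)).foldl
          (fun rv r => if 1 ≤ r ∧ r ≤ n then pvUpd rv r (rv r ++ [(data.length : Int) + 1]) else rv)
          (fun r => pvRev n data r)
          = fun r => pvRev n (data ++ [d]) r := by
        funext x
        rw [foldl_rev_collapse n ((data.length : Int) + 1) _ (PySem.Set.nodup_ofList _)]
        rw [pvRev_append, hnew]
        by_cases hc : 1 ≤ x ∧ x ≤ n ∧ x ∈ PySem.Set.ofList (d.dropLast.drop 1)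
        · rw [if_pos hc, if_pos ⟨hc.1, hc.2.1, hc.2.2⟩]
        · rw [if_neg hc, if_neg (by tauto), List.append_nil]
      have e4 : pvQ0 data = pvQ0 (data ++ [d]) := by
        rw [pvQ0_append, if_neg hs, List.append_nil]
      exact Prod.ext e1 (Prod.ext e2 (Prod.ext e3 e4))

theorem discard_len (s : List Int) (hnd : s.Nodup) (r : Int) (hm : r ∈ s) :
    (PySem.Set.discard s r).length = s.length - 1 := by
  have h : PySem.Set.discard s r = s.erase r := by
    rw [List.Nodup.erase_eq_filter hnd r]; rfl
  rw [h, List.length_erase_of_mem hm]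

theorem discard_pvNodes (data : List (List Int)) (P : List Int) (c r : Int) :
    PySem.Set.discard (pvNodes data P c) r = pvNodes data (P ++ [r]) c := by
  unfold pvNodes
  show List.filter _ _ = _
  rw [List.filter_filter]
  apply List.filter_congr
  intro y _
  simp
  by_cases hy : y = r <;> by_cases hp : y ∈ P <;> simp [hy, hp]

theorem discard_noop (s : List Int) (r : Int) (h : r ∉ s) :
    PySem.Set.discard s r = s := by
  apply List.filter_eq_self.mpr
  intro y hy
  simp
  rintro rfl
  exact h hy

theorem pvNodes_nil_of_sub (data : List (List Int)) (P : List Int) (c : Int)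
    (h : ∀ y ∈ pvDeps data c, y ∈ P) : pvNodes data P c = [] := by
  unfold pvNodes
  rw [List.filter_eq_nil_iff]
  intro y hy
  simp [h y hy]

theorem fold_bisim (build : Int → Int) (r fr : Int) (l : List Int) :
    ∀ (nodes : Int → PySem.Set Int) (req : Int → Int) (q : List Int) (rem : Int → Int),
      l.Nodup →
      (∀ c, rem c = ((nodes c).length : Int)) →
      (∀ c, (nodes c).Nodup) →
      nodes r = [] →
      fr = build r + req r →
      (l.foldl (solveStep build r) (nodes, req, q)).2.1
          = ((l.filter (fun c => PySem.Set.contains (nodes c) r)).foldl (solveAltStep fr) (rem, req, q)).2.1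
        ∧ (l.foldl (solveStep build r) (nodes, req, q)).2.2
          = q ++ l.filter (fun c => PySem.Set.contains (nodes c) r && ((nodes c).length == 1))
        ∧ ((l.filter (fun c => PySem.Set.contains (nodes c) r)).foldl (solveAltStep fr) (rem, req, q)).2.2
          = q ++ l.filter (fun c => PySem.Set.contains (nodes c) r && ((nodes c).length == 1))
        ∧ (∀ c, (l.foldl (solveStep build r) (nodes, req, q)).1 c
              = if c ∈ l then PySem.Set.discard (nodes c) r else nodes c)
        ∧ (∀ c, ((l.filter (fun c => PySem.Set.contains (nodes c) r)).foldl (solveAltStep fr) (rem, req, q)).1 c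
              = (((l.foldl (solveStep build r) (nodes, req, q)).1 c).length : Int)) := by
  induction l with
  | nil =>
    intro nodes req q rem _ h1 _ _ _
    exact ⟨rfl, by simp, by simp, fun c => by simp, fun c => by simpa using h1 c⟩
  | cons c0 l ih =>
    intro nodes req q rem hnd h1 h2 h3 hfr
    obtain ⟨hc0l, hndl⟩ := List.nodup_cons.mp hnd
    by_cases hc : PySem.Set.contains (nodes c0) r = true
    · -- the popped node r is a prerequisite of c0: both programs update c0
      have hmem : r ∈ nodes c0 := by simpa using hc
      have hpos : 1 ≤ (nodes c0).length := List.length_pos_of_mem hmem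
      have hc0r : c0 ≠ r := by
        rintro rfl
        rw [h3] at hmem
        cases hmem
      set s' := PySem.Set.discard (nodes c0) r with hs'
      have hs'len : s'.length = (nodes c0).length - 1 := discard_len _ (h2 c0) _ hmem
      have hguard : (s' = []) ↔ ((nodes c0).length == 1) = true := by
        constructor
        · intro he
          rw [he] at hs'len
          simp at hs'len ⊢
          omega
        · intro he
          simp at he
          rw [← List.length_eq_zero_iff]
          omega
      have hAstep : solveStep build r (nodes, req, q) c0
          = (pvUpd nodes c0 s',
             pvUpd req c0 (max (req c0) (build r + req r)),
             if s' = [] then q ++ [c0] else q) := by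
        simp only [solveStep, hc]
        rw [← hs']
        split_ifs <;> rfl
      have hreq : pvUpd req c0 (max (req c0) (build r + req r))
          = if req c0 < fr then pvUpd req c0 fr else req := by
        rw [← hfr]
        by_cases h : req c0 < fr
        · rw [if_pos h, max_eq_right (le_of_lt h)]
        · rw [if_neg h, max_eq_left (le_of_not_gt h), pvUpd_self]
      have hBstep : solveAltStep fr (rem, req, q) c0
          = (pvUpd rem c0 (rem c0 - 1),
             (if req c0 < fr then pvUpd req c0 fr else req),
             if s' = [] then q ++ [c0] else q) := by
        unfold solveAltStep
        have hg : (pvUpd rem c0 (rem c0 - 1) c0 = 0) ↔ (s' = []) := by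
          rw [pvUpd_same, h1 c0]
          constructor
          · intro hz
            rw [← List.length_eq_zero_iff]
            omega
          · intro he
            rw [he] at hs'len
            simp at hs'len
            omega
        by_cases hz : s' = []
        · rw [if_pos (hg.mpr hz), if_pos hz]
        · rw [if_neg (fun hx => hz (hg.mp hx)), if_neg hz]
      -- apply the induction hypothesis to the stepped state
      set nodes1 := pvUpd nodes c0 s' with hn1
      set req1 := (if req c0 < fr then pvUpd req c0 fr else req) with hr1
      set q1 := (if s' = [] then q ++ [c0] else q) with hq1
      set rem1 := pvUpd rem c0 (rem c0 - 1) with hm1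
      have h1' : ∀ c, rem1 c = ((nodes1 c).length : Int) := by
        intro c
        by_cases hcc : c = c0
        · subst hcc
          rw [hm1, hn1, pvUpd_same, pvUpd_same, h1 c, hs'len]
          omega
        · rw [hm1, hn1, pvUpd_ne _ _ _ _ hcc, pvUpd_ne _ _ _ _ hcc, h1 c]
      have h2' : ∀ c, (nodes1 c).Nodup := by
        intro c
        by_cases hcc : c = c0
        · subst hcc
          rw [hn1, pvUpd_same, hs']
          exact List.Nodup.filter _ (h2 c)
        · rw [hn1, pvUpd_ne _ _ _ _ hcc]
          exact h2 c
      have h3' : nodes1 r = [] := by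
        rw [hn1, pvUpd_ne _ _ _ _ (Ne.symm hc0r)]
        exact h3
      have hfr' : fr = build r + req1 r := by
        rw [hr1]
        by_cases h : req c0 < fr
        · rw [if_pos h, pvUpd_ne _ _ _ _ (Ne.symm hc0r)]
          exact hfr
        · rw [if_neg h]
          exact hfr
      obtain ⟨ih1, ih2, ih3, ih4, ih5⟩ := ih nodes1 req1 q1 rem1 hndl h1' h2' h3' hfr'
      -- the filters over l do not see the update at c0
      have hfeq : l.filter (fun c => PySem.Set.contains (nodes1 c) r)
          = l.filter (fun c => PySem.Set.contains (nodes c) r) := by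
        apply List.filter_congr
        intro c hcl
        rw [hn1, pvUpd_ne _ _ _ _ (by rintro rfl; exact hc0l hcl)]
      have hfeq2 : l.filter (fun c => PySem.Set.contains (nodes1 c) r && ((nodes1 c).length == 1))
          = l.filter (fun c => PySem.Set.contains (nodes c) r && ((nodes c).length == 1)) := by
        apply List.filter_congr
        intro c hcl
        rw [hn1, pvUpd_ne _ _ _ _ (by rintro rfl; exact hc0l hcl)]
      have hlfA : (c0 :: l).foldl (solveStep build r) (nodes, req, q)
          = l.foldl (solveStep build r) (nodes1, req1, q1) := by
        rw [List.foldl_cons, hAstep, hreq]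
      have hlfB : ((c0 :: l).filter (fun c => PySem.Set.contains (nodes c) r)).foldl
              (solveAltStep fr) (rem, req, q)
          = (l.filter (fun c => PySem.Set.contains (nodes1 c) r)).foldl
              (solveAltStep fr) (rem1, req1, q1) := by
        rw [List.filter_cons_of_pos (p := fun c => PySem.Set.contains (nodes c) r)
              (by simpa using hc), List.foldl_cons, hBstep, hfeq]
      refine ⟨?_, ?_, ?_, ?_, ?_⟩
      · rw [hlfA, hlfB, ih1]
      · rw [hlfA, ih2, hfeq2]
        by_cases hz : s' = []
        · rw [hq1, if_pos hz,
            List.filter_cons_of_pos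
              (p := fun c => PySem.Set.contains (nodes c) r && ((nodes c).length == 1))
              (by simp only [hc, Bool.true_and]; exact hguard.mp hz)]
          simp [List.append_assoc]
        · rw [hq1, if_neg hz,
            List.filter_cons_of_neg
              (p := fun c => PySem.Set.contains (nodes c) r && ((nodes c).length == 1))
              (by simp only [hc, Bool.true_and]
                  exact fun he => hz (hguard.mpr he))]
      · rw [hlfB, ih3, hfeq2]
        by_cases hz : s' = []
        · rw [hq1, if_pos hz,
            List.filter_cons_of_pos
              (p := fun c => PySem.Set.contains (nodes c) r && ((nodes c).length == 1))
              (by simp only [hc, Bool.true_and]; exact hguard.mp hz)]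
          simp [List.append_assoc]
        · rw [hq1, if_neg hz,
            List.filter_cons_of_neg
              (p := fun c => PySem.Set.contains (nodes c) r && ((nodes c).length == 1))
              (by simp only [hc, Bool.true_and]
                  exact fun he => hz (hguard.mpr he))]
      · intro c
        rw [hlfA, ih4 c]
        by_cases hcl : c ∈ l
        · have hcc : c ≠ c0 := fun he => hc0l (he ▸ hcl)
          rw [if_pos hcl, if_pos (List.mem_cons_of_mem c0 hcl), hn1, pvUpd_ne _ _ _ _ hcc]
        · rw [if_neg hcl]
          by_cases hcc : c = c0
          · subst hcc
            rw [if_pos List.mem_cons_self, hn1, pvUpd_same]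
          · rw [if_neg (by simp [hcc, hcl]), hn1, pvUpd_ne _ _ _ _ hcc]
      · intro c
        rw [hlfA, hlfB]
        exact ih5 c
    · -- r is not a prerequisite of c0: both programs skip c0
      have hAstep : solveStep build r (nodes, req, q) c0 = (nodes, req, q) := by
        unfold solveStep
        rw [if_neg hc]
      obtain ⟨ih1, ih2, ih3, ih4, ih5⟩ := ih nodes req q rem hndl h1 h2 h3 hfr
      have hfB : (c0 :: l).filter (fun c => PySem.Set.contains (nodes c) r)
          = l.filter (fun c => PySem.Set.contains (nodes c) r) :=
        List.filter_cons_of_neg (p := fun c => PySem.Set.contains (nodes c) r) (by simpa using hc)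
      have hf2 : (c0 :: l).filter (fun c => PySem.Set.contains (nodes c) r && ((nodes c).length == 1))
          = l.filter (fun c => PySem.Set.contains (nodes c) r && ((nodes c).length == 1)) :=
        List.filter_cons_of_neg
          (p := fun c => PySem.Set.contains (nodes c) r && ((nodes c).length == 1))
          (by
            simp
            intro hm
            exact (hc (by simpa using hm)).elim)
      refine ⟨?_, ?_, ?_, ?_, ?_⟩
      · rw [List.foldl_cons, hAstep, hfB, ih1]
      · rw [List.foldl_cons, hAstep, ih2, hf2]
      · rw [hfB, ih3, hf2]
      · intro c
        rw [List.foldl_cons, hAstep, ih4]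
        by_cases hcl : c ∈ l
        · rw [if_pos hcl, if_pos (List.mem_cons_of_mem c0 hcl)]
        · rw [if_neg hcl]
          by_cases hcc : c = c0
          · subst hcc
            rw [if_pos List.mem_cons_self]
            exact (discard_noop _ _ (fun hm => hc (by simpa using hm))).symm
          · rw [if_neg (by simp [hcc, hcl])]
      · intro c
        rw [List.foldl_cons, hAstep, hfB]
        exact ih5 c

theorem pvNodes_nodup (data : List (List Int)) (P : List Int) (c : Int) :
    (pvNodes data P c).Nodup :=
  List.Nodup.filter _ (pvDeps_nodup data c)

theorem pvRev_eq_filter (n : Int) (data : List (List Int)) (P : List Int) (r : Int)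
    (hlen : (data.length : Int) ≤ n) (hb : 1 ≤ r ∧ r ≤ n) (hP : r ∉ P) :
    pvRev n data r
      = (PySem.List.pyRange 1 (n + 1) 1).filter
          (fun c => PySem.Set.contains (pvNodes data P c) r) := by
  unfold pvRev
  rw [if_pos hb,
      PySem.List.pyRange_one_append 1 ((data.length : Int) + 1) (n + 1) (by omega) (by omega),
      List.filter_append]
  have h2 : (PySem.List.pyRange ((data.length : Int) + 1) (n + 1) 1).filter
      (fun c => PySem.Set.contains (pvNodes data P c) r) = [] := by
    rw [List.filter_eq_nil_iff]
    intro c hcm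
    have hcb := PySem.List.mem_pyRange_one.mp hcm
    have hd : pvDeps data c = [] := pvDeps_nil_of_out _ _ (by omega)
    simp [pvNodes, hd]
  rw [h2, List.append_nil]
  apply List.filter_congr
  intro c _
  by_cases hm : r ∈ pvDeps data c
  · simp [hm, pvNodes, hP]
  · simp [hm, pvNodes]

theorem loop_bisim (n : Int) (data : List (List Int)) (build : Int → Int)
    (hlen : (data.length : Int) ≤ n) :
    ∀ (fuel : Nat) (P q : List Int) (nodes : Int → PySem.Set Int) (rem req : Int → Int),
      (∀ c, nodes c = pvNodes data P c) →
      (∀ c, rem c = ((nodes c).length : Int)) →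
      (P ++ q).Nodup →
      (∀ x ∈ P ++ q, 1 ≤ x ∧ x ≤ n ∧ ∀ y ∈ pvDeps data x, y ∈ P) →
      solveLoop n build fuel nodes req q
        = solveAltLoop build (fun r => pvRev n data r) fuel rem req q := by
  intro fuel
  induction fuel with
  | zero => intro P q nodes rem req _ _ _ _; rfl
  | succ fuel ih =>
    intro P q nodes rem req hn hr h3 h4
    cases q with
    | nil => rfl
    | cons r rest =>
      obtain ⟨hr1, hr2, hdeps⟩ := h4 r (by simp)
      have hrP : r ∉ P := by
        intro hrp
        rw [List.nodup_append] at h3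
        exact h3.2.2 r hrp r List.mem_cons_self rfl
      have hrrest : r ∉ rest := by
        have := (List.nodup_append.mp h3).2.1
        exact (List.nodup_cons.mp this).1
      have hnodesr : nodes r = [] := by
        rw [hn r]; exact pvNodes_nil_of_sub data P r hdeps
      simp only [solveLoop, solveAltLoop]
      rw [pvRev_eq_filter n data P r hlen ⟨hr1, hr2⟩ hrP,
          show (fun c => PySem.Set.contains (pvNodes data P c) r)
              = (fun c => PySem.Set.contains (nodes c) r) from by
            funext c; rw [hn c]]
      obtain ⟨e1, e2, e3, e4, e5⟩ :=
        fold_bisim build r (build r + req r) (PySem.List.pyRange 1 (n + 1) 1)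
          nodes req rest rem (PySem.List.nodup_pyRange_one 1 (n + 1))
          hr (fun c => by rw [hn c]; exact pvNodes_nodup data P c) hnodesr rfl
      rw [e3.trans e2.symm, ← e1, e2]
      set T := (PySem.List.pyRange 1 (n + 1) 1).filter
        (fun c => PySem.Set.contains (nodes c) r && ((nodes c).length == 1)) with hT
      have hTnotold : ∀ x ∈ T, x ∉ P ++ r :: rest := by
        intro x hxT hxold
        have hx4 := h4 x hxold
        have hxnil : nodes x = [] := by
          rw [hn x]; exact pvNodes_nil_of_sub data P x hx4.2.2
        have hcont := (List.mem_filter.mp hxT).2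
        rw [hxnil] at hcont
        simp at hcont
      have hTsub : ∀ x ∈ T, 1 ≤ x ∧ x ≤ n := by
        intro x hxT
        have := PySem.List.mem_pyRange_one.mp (List.mem_filter.mp hxT).1
        omega
      have hTdeps : ∀ x ∈ T, ∀ y ∈ pvDeps data x, y ∈ P ++ [r] := by
        intro x hxT y hy
        have hcont := (List.mem_filter.mp hxT).2
        rw [Bool.and_eq_true] at hcont
        have hxm : r ∈ nodes x := by simpa using hcont.1
        have hxlen : (nodes x).length = 1 := by simpa using hcont.2
        have hnd : (nodes x).Nodup := by rw [hn x]; exact pvNodes_nodup data P x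
        have hdisc : PySem.Set.discard (nodes x) r = [] := by
          rw [← List.length_eq_zero_iff, discard_len _ hnd _ hxm, hxlen]
        rw [hn x, discard_pvNodes] at hdisc
        have hyp := List.filter_eq_nil_iff.mp hdisc y hy
        simp at hyp
        by_cases hyP : y ∈ P
        · exact List.mem_append_left _ hyP
        · rw [hyp hyP]
          exact List.mem_append_right _ (by simp)
      refine ih (P ++ [r]) _ _ _ _ ?_ e5 ?_ ?_
      · -- nodes invariant
        intro c
        rw [e4 c]
        by_cases hcl : c ∈ PySem.List.pyRange 1 (n + 1) 1
        · rw [if_pos hcl, hn c, discard_pvNodes]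
        · rw [if_neg hcl]
          have hout : ¬ (1 ≤ c ∧ c ≤ n) := by
            intro hcb
            exact hcl (PySem.List.mem_pyRange_one.mpr ⟨hcb.1, by omega⟩)
          have hd : pvDeps data c = [] := pvDeps_nil_of_out _ _ (by omega)
          rw [hn c]
          simp [pvNodes, hd]
      · -- nodup
        have h3' := h3
        rw [List.nodup_append] at h3'
        obtain ⟨hPnd, hrrestnd, hdisj⟩ := h3'
        have hrestnd := (List.nodup_cons.mp hrrestnd).2
        have hTnd : T.Nodup :=
          List.Nodup.filter _ (PySem.List.nodup_pyRange_one 1 (n + 1))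
        rw [List.nodup_append]
        refine ⟨?_, ?_, ?_⟩
        · rw [List.nodup_append]
          refine ⟨hPnd, List.nodup_singleton r, ?_⟩
          intro a haP b hbr he
          rw [List.mem_singleton] at hbr
          subst hbr
          exact hrP (he ▸ haP)
        · rw [List.nodup_append]
          refine ⟨hrestnd, hTnd, ?_⟩
          intro a harest b hbT he
          subst he
          exact hTnotold a hbT (List.mem_append_right _ (List.mem_cons_of_mem r harest))
        · intro a haPr b hbrT he
          subst he
          rcases List.mem_append.mp hbrT with h | h
          · rcases List.mem_append.mp haPr with hp | hp
            · exact hdisj a hp a (List.mem_cons_of_mem r h) rfl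
            · rw [List.mem_singleton] at hp
              subst hp
              exact hrrest h
          · rcases List.mem_append.mp haPr with hp | hp
            · exact hTnotold a h (List.mem_append_left _ hp)
            · rw [List.mem_singleton] at hp
              subst hp
              exact hTnotold a h (List.mem_append_right _ List.mem_cons_self)
      · -- member facts
        intro x hx
        rcases List.mem_append.mp hx with hx1 | hx2
        · rcases List.mem_append.mp hx1 with hp | hp
          · obtain ⟨b1, b2, bd⟩ := h4 x (List.mem_append_left _ hp)
            exact ⟨b1, b2, fun y hy => List.mem_append_left _ (bd y hy)⟩
          · simp at hp
            subst hp
            exact ⟨hr1, hr2, fun y hy => List.mem_append_left _ (hdeps y hy)⟩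
        · rcases List.mem_append.mp hx2 with hp | hp
          · obtain ⟨b1, b2, bd⟩ := h4 x (List.mem_append_right _ (List.mem_cons_of_mem r hp))
            exact ⟨b1, b2, fun y hy => List.mem_append_left _ (bd y hy)⟩
          · obtain ⟨b1, b2⟩ := hTsub x hp
            exact ⟨b1, b2, hTdeps x hp⟩

theorem pvDeps_nil_of_src (data : List (List Int)) (x : Int) (h : pvSrc data x = true) :
    pvDeps data x = [] := by
  unfold pvSrc at h
  unfold pvDeps
  rw [Bool.and_eq_true, decide_eq_true_iff, decide_eq_true_iff] at h
  rw [if_neg]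
  rintro ⟨_, _, hn⟩
  exact hn h.2

theorem loopA_nil (n : Int) (build : Int → Int) (fuel : Nat)
    (nodes : Int → PySem.Set Int) (req : Int → Int) :
    solveLoop n build fuel nodes req [] = req := by
  cases fuel <;> rfl

theorem loopB_nil (build : Int → Int) (rev : Int → List Int) (fuel : Nat)
    (rem req : Int → Int) :
    solveAltLoop build rev fuel rem req [] = req := by
  cases fuel <;> rfl

theorem solve_eq_alt (n : Int) (data : List (List Int)) (h : Pre_solve n data) :
    solve n data = solve_alt n data := by
  obtain ⟨hlen0, _⟩ := h
  have hA : solve n data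
      = (PySem.List.pyRange 1 (n + 1) 1).map
          (fun i => pvBt data i
            + solveLoop n (fun i => pvBt data i) (data.length + (n + 1).toNat)
                (fun i => pvDeps data i) (fun _ => 0) (pvQ0 data) i) := by
    unfold solve
    rw [solveInit_spec]
  have hB : solve_alt n data
      = (PySem.List.pyRange 1 (n + 1) 1).map
          (fun i => pvBt data i
            + solveAltLoop (fun i => pvBt data i) (fun r => pvRev n data r)
                (data.length + (n + 1).toNat)
                (fun i => ((pvDeps data i).length : Int)) (fun _ => 0) (pvQ0 data) i) := by
    unfold solve_alt
    rw [solveAltInit_spec]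
  rw [hA, hB]
  by_cases hd : data = []
  · subst hd
    have hq : pvQ0 ([] : List (List Int)) = [] := rfl
    simp only [hq, loopA_nil, loopB_nil]
  · have hlen : (data.length : Int) ≤ n := by
      rcases hlen0 with h | h
      · exact h
      · exact absurd h hd
    have hQnd : (pvQ0 data).Nodup :=
      List.Nodup.filter _ (PySem.List.nodup_pyRange_one 1 ((data.length : Int) + 1))
    have heq := loop_bisim n data (fun i => pvBt data i) hlen
      (data.length + (n + 1).toNat) [] (pvQ0 data)
      (fun i => pvDeps data i) (fun i => ((pvDeps data i).length : Int)) (fun _ => 0)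
      (fun c => by simp [pvNodes])
      (fun c => rfl)
      (by simpa using hQnd)
      (by
        intro x hx
        simp only [List.nil_append] at hx
        have hxm := List.mem_filter.mp hx
        have hxb := PySem.List.mem_pyRange_one.mp hxm.1
        refine ⟨by omega, by omega, ?_⟩
        rw [pvDeps_nil_of_src data x hxm.2]
        intro y hy
        cases hy)
    simp only [heq]

-- ===== VERDICT (by name: the statement is the Claim_ definition above) =====
theorem solve_spec : Claim_equal_solve := by
  intro n data _ hpre
  unfold Spec_solve
  exact solve_eq_alt n data hpre
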